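-- pv_equiv track=rewrite | github.com/Syed-Eftasum-Alam/Artificial-Intelligence | Hill CLimbing/Hill Climbing Serach.py | state_generation
-- ===== SOURCE A (Python) =====
-- import math
--
-- def calc_cost(state):
--     cost = 0
--     for i in range(len(state)):
--         for j in range(len(state)):
--             if (state[i] > state[j]) and (i < j):
--                 cost += 1
--     return cost
--
-- def state_generation(current_state):
--   while True:
--     current_cost = calc_cost(current_state)
--     min_cost = math.inf
--     min_state = None
--     for i in range(len(current_state)):
--         for j in range(i+1, len(current_state)):
--             new_state = current_state.copy()
--             temp = new_state[i]
--             new_state[i] = new_state[j]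
--             new_state[j] = temp
--             new_cost = calc_cost(new_state)
--             if new_cost < min_cost:
--                 min_cost = new_cost
--                 min_state = new_state
--     if min_cost < current_cost:
--         current_state = min_state
--         current_cost = min_cost
--     else:
--         return current_state, calc_cost(current_state)
-- ===== SOURCE B (Python) =====
-- def state_generation(current_state):
--     # The hill climbing in A searches all pairwise swaps, minimizing the
--     # inversion count, and stops only when no swap strictly improves it.
--     # Any state with an inversion has an improving adjacent swap, so the
--     # only fixed points are inversion-free states: the search always ends
--     # at the sorted permutation of the input, with cost 0.
--     return sorted(current_state), 0
-- ===== Notes on version B (the rewrite author's own statement) =====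
-- stated objective: faster
-- what changed: Replaced the whole iterative hill-climbing search by its closed form: since every state with an inversion admits a strictly improving swap, A's loop provably always terminates at the globally optimal state, so B returns (sorted(current_state), 0) directly.
import Mathlib
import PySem

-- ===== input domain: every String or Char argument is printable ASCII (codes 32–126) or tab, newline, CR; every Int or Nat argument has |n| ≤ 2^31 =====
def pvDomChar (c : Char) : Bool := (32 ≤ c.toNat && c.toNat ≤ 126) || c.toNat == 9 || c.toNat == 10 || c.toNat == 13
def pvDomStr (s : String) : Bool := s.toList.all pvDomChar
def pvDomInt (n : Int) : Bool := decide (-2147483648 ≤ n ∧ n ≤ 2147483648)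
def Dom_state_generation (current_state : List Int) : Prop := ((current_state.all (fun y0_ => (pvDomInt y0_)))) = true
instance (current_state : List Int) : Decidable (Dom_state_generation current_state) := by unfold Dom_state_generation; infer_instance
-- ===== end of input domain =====

-- B replaces A's iterative hill-climbing swap search by its closed form (the sorted list with cost 0);
-- only the RETURN VALUES are compared (A does not mutate its argument).

-- ===== PORT A =====

-- calc_cost: the nested 'for i / for j' loops counting pairs with state[i] > state[j] and i < j.
-- state[i] for the in-range indices produced by range(): PySem.List.pyGetD with default 0 is exact.
def calc_cost (state : List Int) : Int :=
  (PySem.List.pyRange 0 (state.length : Int)).foldl (fun cost i =>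
    (PySem.List.pyRange 0 (state.length : Int)).foldl (fun cost j =>
      if PySem.List.pyGetD state i 0 > PySem.List.pyGetD state j 0 ∧ i < j then cost + 1
      else cost) cost) 0

-- Python item assignment 'lst[k] = v' for the non-negative in-range k produced by range(): List.set is exact there.
def py_setitem (xs : List Int) (k : Int) (v : Int) : List Int := xs.set k.toNat v

-- the inner-loop body: new_state = current_state.copy(); temp = new_state[i];
-- new_state[i] = new_state[j]; new_state[j] = temp
def swap_state (cs : List Int) (i j : Int) : List Int :=
  let new_state := cs
  let temp := PySem.List.pyGetD new_state i 0
  let new_state' := py_setitem new_state i (PySem.List.pyGetD new_state j 0)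
  py_setitem new_state' j temp

-- the double loop tracking (min_cost, min_state); 'none' is the initial (math.inf, None) pair,
-- so the 'new_cost < min_cost' test is vacuously true at 'none'.
def best_swap (cs : List Int) : Option (Int × List Int) :=
  (PySem.List.pyRange 0 (cs.length : Int)).foldl (fun acc i =>
    (PySem.List.pyRange (i + 1) (cs.length : Int)).foldl (fun acc j =>
      let new_state := swap_state cs i j
      let new_cost := calc_cost new_state
      match acc with
      | none => some (new_cost, new_state)
      | some (mc, ms) => if new_cost < mc then some (new_cost, new_state) else some (mc, ms))
      acc) none

-- generic: a foldl preserves any property each step preserves (used by the termination bound)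
theorem pv_foldl_preserve {α β : Type} (Q : β → Prop) (f : β → α → β)
    (h : ∀ b a, Q b → Q (f b a)) : ∀ (l : List α) (b : β), Q b → Q (l.foldl f b) := by
  intro l
  induction l with
  | nil => intro b hb; exact hb
  | cons x t ih => intro b hb; exact ih _ (h b x hb)

-- termination helper: the tracked min_cost is the cost of the tracked min_state
theorem best_swap_cost (cs : List Int) (mc : Int) (ms : List Int)
    (h : best_swap cs = some (mc, ms)) : mc = calc_cost ms := by
  unfold best_swap at h
  refine pv_foldl_preserve
    (Q := fun acc : Option (Int × List Int) =>
      ∀ mc' ms', acc = some (mc', ms') → mc' = calc_cost ms')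
    _ ?_ _ none (by simp) mc ms h
  intro b i hb
  refine pv_foldl_preserve
    (Q := fun acc : Option (Int × List Int) =>
      ∀ mc' ms', acc = some (mc', ms') → mc' = calc_cost ms')
    _ ?_ _ b hb
  intro acc j hacc mc' ms' h'
  cases acc with
  | none =>
    injection h' with h''
    injection h'' with h1 h2
    subst h2; exact h1.symm ▸ rfl
  | some p =>
    obtain ⟨c, s⟩ := p
    simp only [] at h'
    split_ifs at h' with hlt
    · injection h' with h''; injection h'' with h1 h2; subst h2; exact h1.symm ▸ rfl
    · exact hacc mc' ms' h'

-- termination helper: calc_cost is non-negative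
theorem calc_cost_nonneg (s : List Int) : 0 ≤ calc_cost s := by
  unfold calc_cost
  simp only [PySem.List.foldl_ite_add_one, PySem.List.foldl_add]
  have h : ∀ x ∈ (PySem.List.pyRange 0 (s.length : Int)).map
      (fun i => ((PySem.List.pyRange 0 (s.length : Int)).countP
        (fun j => decide (PySem.List.pyGetD s i 0 > PySem.List.pyGetD s j 0 ∧ i < j)) : Int)), 0 ≤ x := by
    intro x hx
    simp only [List.mem_map] at hx
    obtain ⟨i, _, rfl⟩ := hx
    positivity
  have := List.sum_nonneg h
  omega

-- the while-loop of state_generation: loop on min_state while min_cost < current_cost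
def state_generation (current_state : List Int) : List Int × Int :=
  let current_cost := calc_cost current_state
  match h : best_swap current_state with
  | some (mc, ms) =>
      if mc < current_cost then state_generation ms
      else (current_state, calc_cost current_state)
  | none => (current_state, calc_cost current_state)
termination_by (calc_cost current_state).toNat
decreasing_by
  have h1 := best_swap_cost current_state mc ms h
  have h2 := calc_cost_nonneg ms
  omega

-- ===== PORT B =====
def state_generation_alt (current_state : List Int) : List Int × Int :=
  (PySem.List.sorted current_state (fun x => x), 0)

-- ===== PRECONDITION & SPEC =====
def Spec_state_generation (current_state : List Int) (out : List Int × Int) : Prop := out = state_generation_alt current_state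
instance (current_state : List Int) (out : List Int × Int) : Decidable (Spec_state_generation current_state out) := by unfold Spec_state_generation; infer_instance

-- ===== CLAIM (what is proved, stated in full; the proofs are below) =====
def Claim_equal_state_generation : Prop := ∀ (current_state : List Int), Dom_state_generation current_state → Spec_state_generation current_state (state_generation current_state)

-- ===== LEMMAS AND PROOFS =====

-- structural inversion count
def invCount : List Int → Nat
  | [] => 0
  | x :: xs => xs.countP (fun y => decide (y < x)) + invCount xs

theorem pv_map_getD_range (xs : List Int) :
    (List.range xs.length).map (fun i => xs.getD i 0) = xs := by
  induction xs with
  | nil => simp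
  | cons x t ih =>
    rw [List.length_cons, List.range_succ_eq_map]
    simp only [List.map_cons, List.getD_cons_zero, List.map_map, Function.comp_def,
      List.getD_cons_succ]
    rw [ih]

theorem pv_countP_range (xs : List Int) (p : Int → Bool) :
    (List.range xs.length).countP (fun j => p (xs.getD j 0)) = xs.countP p := by
  have h : (List.range xs.length).countP (fun j => p (xs.getD j 0))
      = ((List.range xs.length).map (fun i => xs.getD i 0)).countP p := by
    rw [List.countP_map]; rfl
  rw [h, pv_map_getD_range]

theorem pv_gsum (s : List Int) :
    ((List.range s.length).map (fun i =>
      (List.range s.length).countP (fun j => decide (s.getD j 0 < s.getD i 0 ∧ i < j)))).sum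
    = invCount s := by
  induction s with
  | nil => simp [invCount]
  | cons x xs ih =>
    rw [List.length_cons, List.range_succ_eq_map]
    simp only [List.map_cons, List.sum_cons, List.map_map, Function.comp_def,
      List.countP_cons, List.countP_map, List.getD_cons_zero, List.getD_cons_succ,
      and_false, decide_false, Nat.succ_eq_add_one,
      Nat.zero_lt_succ, and_true,
      Nat.not_lt_zero, Nat.add_one_lt_add_one_iff]
    simp only [Bool.false_eq_true, if_false, add_zero]
    rw [invCount, pv_countP_range xs (fun y => decide (y < x)), ih]

theorem pv_sum_map_natCast (l : List Nat) (f : Nat → Nat) :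
    (l.map (fun x => (f x : Int))).sum = ((l.map f).sum : Int) := by
  induction l with
  | nil => simp
  | cons x t ih => simp [ih]

-- bridge: the double index loop computes the structural inversion count
theorem calc_cost_eq_invCount (s : List Int) : calc_cost s = (invCount s : Int) := by
  unfold calc_cost
  simp only [PySem.List.foldl_ite_add_one, PySem.List.foldl_add, PySem.List.pyRange_zero_natCast,
    List.countP_map, List.map_map, zero_add, Function.comp_def,
    PySem.List.pyGetD_natCast, gt_iff_lt, Nat.cast_lt]
  rw [pv_sum_map_natCast, pv_gsum]

-- a sorted (pairwise-≤) list has no inversions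
theorem invCount_eq_zero_of_pairwise (s : List Int) (h : s.Pairwise (· ≤ ·)) :
    invCount s = 0 := by
  induction s with
  | nil => rfl
  | cons x xs ih =>
    rw [List.pairwise_cons] at h
    rw [invCount, ih h.2, List.countP_eq_zero.mpr]
    intro y hy
    simpa using not_lt.mpr (h.1 y hy)

-- swapping an adjacent inversion removes exactly one inversion
theorem invCount_adj_swap (u v : List Int) (a b : Int) (h : b < a) :
    invCount (u ++ b :: a :: v) + 1 = invCount (u ++ a :: b :: v) := by
  induction u with
  | nil =>
    simp only [List.nil_append, invCount, List.countP_cons, decide_eq_true_eq]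
    have h1 : ¬ (a < b) := not_lt.mpr h.le
    simp [h, h1]
    omega
  | cons x u ih =>
    simp only [List.cons_append, invCount, List.countP_append, List.countP_cons]
    omega

-- list surgery for Python's in-range item assignment
theorem pv_set_len (u : List Int) (a v : Int) (w : List Int) :
    (u ++ a :: w).set u.length v = u ++ v :: w := by
  induction u with
  | nil => rfl
  | cons x t ih => simp [List.set_cons_succ, ih]

theorem pv_getD_len (u : List Int) (a : Int) (w : List Int) :
    (u ++ a :: w).getD u.length 0 = a := by
  induction u with
  | nil => rfl
  | cons x t ih =>
    simp only [List.cons_append, List.length_cons, List.getD_cons_succ]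
    exact ih

-- swapping adjacent positions p, p+1 in decomposed form
theorem swap_state_adj (t d : List Int) (a b : Int) :
    swap_state (t ++ a :: b :: d) (t.length : Int) ((t.length : Int) + 1) = t ++ b :: a :: d := by
  unfold swap_state py_setitem
  have hcast : ((t.length : Int) + 1) = ((t.length + 1 : Nat) : Int) := by push_cast; ring
  rw [hcast]
  have hb : (t ++ a :: b :: d).getD (t.length + 1) 0 = b := by
    have : t ++ a :: b :: d = (t ++ [a]) ++ b :: d := by simp
    rw [this, show t.length + 1 = (t ++ [a]).length by simp, pv_getD_len]
  simp only [PySem.List.pyGetD_natCast, Int.toNat_natCast, hb, pv_getD_len]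
  rw [pv_set_len t a b (b :: d)]
  have : t ++ b :: b :: d = (t ++ [b]) ++ b :: d := by simp
  rw [this, show t.length + 1 = (t ++ [b]).length by simp, pv_set_len]
  simp

-- a double set at p < q with the two read values is a permutation (the Python swap)
theorem pv_perm_pick (x : Int) : ∀ (xs : List Int) (m : Nat), m < xs.length →
    (xs.getD m 0 :: xs.set m x).Perm (x :: xs) := by
  intro xs
  induction xs with
  | nil => intro m hm; simp at hm
  | cons y t ih =>
    intro m hm
    cases m with
    | zero => simpa using List.Perm.swap x y t
    | succ m =>
      simp only [List.getD_cons_succ, List.set_cons_succ]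
      exact ((List.Perm.swap y (t.getD m 0) (t.set m x)).trans
        ((ih m (by simpa using hm)).cons y)).trans (List.Perm.swap x y t)

theorem pv_perm_set_swap : ∀ (l : List Int) (p q : Nat), p < q → q < l.length →
    ((l.set p (l.getD q 0)).set q (l.getD p 0)).Perm l := by
  intro l
  induction l with
  | nil => intro p q _ hq; simp at hq
  | cons x xs ih =>
    intro p q hpq hq
    cases q with
    | zero => omega
    | succ m =>
      cases p with
      | zero =>
        simp only [List.getD_cons_succ, List.getD_cons_zero, List.set_cons_zero,
          List.set_cons_succ]
        exact pv_perm_pick x xs m (by simpa using hq)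
      | succ p =>
        simp only [List.getD_cons_succ, List.set_cons_succ]
        exact (ih p m (by omega) (by simpa using hq)).cons x

-- the step function of the min-tracking fold, and the flattened candidate list
def pstep : Option (Int × List Int) → List Int → Option (Int × List Int)
  | none, st => some (calc_cost st, st)
  | some (mc, ms), st => if calc_cost st < mc then some (calc_cost st, st) else some (mc, ms)

def cands (cs : List Int) : List (List Int) :=
  (PySem.List.pyRange 0 (cs.length : Int)).flatMap
    (fun i => (PySem.List.pyRange (i + 1) (cs.length : Int)).map (fun j => swap_state cs i j))

theorem best_swap_eq_pick (cs : List Int) :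
    best_swap cs = (cands cs).foldl pstep none := by
  unfold best_swap cands
  rw [List.foldl_flatMap]
  apply PySem.List.foldl_congr_mem
  intro acc i _
  rw [List.foldl_map]
  apply PySem.List.foldl_congr_mem
  intro acc' j _
  cases acc' <;> rfl

theorem pick_le : ∀ (l : List (List Int)) (acc : Option (Int × List Int)) (mc : Int) (ms : List Int),
    l.foldl pstep acc = some (mc, ms) →
    (∀ c s, acc = some (c, s) → mc ≤ c) ∧ (∀ y ∈ l, mc ≤ calc_cost y) := by
  intro l
  induction l with
  | nil =>
    intro acc mc ms h
    refine ⟨fun c s hc => ?_, fun y hy => absurd hy (List.not_mem_nil)⟩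
    simp only [List.foldl_nil] at h
    rw [h] at hc
    injection hc with hc'
    injection hc' with h1 _
    omega
  | cons st rest ih =>
    intro acc mc ms h
    simp only [List.foldl_cons] at h
    have hstep : ∀ c s, pstep acc st = some (c, s) → c ≤ calc_cost st ∧ (∀ c0 s0, acc = some (c0, s0) → c ≤ c0) := by
      intro c s hc
      cases acc with
      | none =>
        simp only [pstep] at hc
        injection hc with hc'
        injection hc' with h1 _
        exact ⟨by omega, by intro c0 s0 h0; cases h0⟩
      | some p =>
        obtain ⟨c0, s0⟩ := p
        simp only [pstep] at hc
        split_ifs at hc with hlt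
        · injection hc with hc'; injection hc' with h1 _
          constructor
          · omega
          · intro c1 s1 h1'; injection h1' with h1''; injection h1'' with h2 _; omega
        · injection hc with hc'; injection hc' with h1 _
          constructor
          · omega
          · intro c1 s1 h1'; injection h1' with h1''; injection h1'' with h2 _; omega
    have ht := ih (pstep acc st) mc ms h
    obtain ⟨c', s', hc'⟩ : ∃ c' s', pstep acc st = some (c', s') := by
      cases acc with
      | none => exact ⟨_, _, rfl⟩
      | some p =>
        obtain ⟨c0, s0⟩ := p
        simp only [pstep]
        split_ifs <;> exact ⟨_, _, rfl⟩
    have h1 := ht.1 c' s' hc'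
    have h2 := hstep c' s' hc'
    constructor
    · intro c0 s0 h0
      have := h2.2 c0 s0 h0
      omega
    · intro y hy
      rcases List.mem_cons.mp hy with rfl | hy'
      · omega
      · exact ht.2 y hy'

theorem pick_mem : ∀ (l : List (List Int)) (acc : Option (Int × List Int)) (mc : Int) (ms : List Int),
    l.foldl pstep acc = some (mc, ms) →
    acc = some (mc, ms) ∨ (ms ∈ l ∧ mc = calc_cost ms) := by
  intro l
  induction l with
  | nil => intro acc mc ms h; exact Or.inl h
  | cons st rest ih =>
    intro acc mc ms h
    simp only [List.foldl_cons] at h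
    rcases ih (pstep acc st) mc ms h with hacc | ⟨hm, hc⟩
    · cases acc with
      | none =>
        simp only [pstep] at hacc
        injection hacc with h'
        injection h' with h1 h2
        subst h2
        exact Or.inr ⟨List.mem_cons_self, by omega⟩
      | some p =>
        obtain ⟨c0, s0⟩ := p
        simp only [pstep] at hacc
        split_ifs at hacc with hlt
        · injection hacc with h'
          injection h' with h1 h2
          subst h2
          exact Or.inr ⟨List.mem_cons_self, by omega⟩
        · exact Or.inl hacc
    · exact Or.inr ⟨List.mem_cons_of_mem _ hm, hc⟩

theorem pick_isSome : ∀ (l : List (List Int)) (acc : Option (Int × List Int)),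
    acc.isSome → (l.foldl pstep acc).isSome := by
  intro l
  induction l with
  | nil => intro acc h; exact h
  | cons st rest ih =>
    intro acc h
    simp only [List.foldl_cons]
    apply ih
    cases acc with
    | none => rfl
    | some p => obtain ⟨c, s⟩ := p; simp only [pstep]; split_ifs <;> rfl

theorem mem_cands (cs st : List Int) :
    st ∈ cands cs ↔ ∃ i j : Int, 0 ≤ i ∧ i < j ∧ j < (cs.length : Int) ∧ st = swap_state cs i j := by
  unfold cands
  simp only [List.mem_flatMap, List.mem_map, PySem.List.mem_pyRange_one]
  constructor
  · rintro ⟨i, ⟨h0, hi⟩, j, ⟨hj1, hj2⟩, rfl⟩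
    exact ⟨i, j, h0, by omega, hj2, rfl⟩
  · rintro ⟨i, j, h0, hij, hj, rfl⟩
    exact ⟨i, ⟨h0, by omega⟩, j, ⟨by omega, hj⟩, rfl⟩

theorem swap_state_perm (cs : List Int) (i j : Int) (h0 : 0 ≤ i) (hij : i < j)
    (hj : j < (cs.length : Int)) : (swap_state cs i j).Perm cs := by
  obtain ⟨p, rfl⟩ := Int.eq_ofNat_of_zero_le h0
  obtain ⟨q, rfl⟩ := Int.eq_ofNat_of_zero_le (by omega : (0:Int) ≤ j)
  unfold swap_state py_setitem
  simp only [PySem.List.pyGetD_natCast, Int.toNat_natCast]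
  exact pv_perm_set_swap cs p q (by exact_mod_cast hij) (by exact_mod_cast hj)

-- a non-sorted list has an adjacent inversion
theorem pv_adj_inv (l : List Int) (h : ¬ l.Pairwise (· ≤ ·)) :
    ∃ p, p + 1 < l.length ∧ l.getD (p + 1) 0 < l.getD p 0 := by
  rw [← List.isChain_iff_pairwise, List.isChain_iff_getElem] at h
  push Not at h
  obtain ⟨p, hp, hlt⟩ := h
  refine ⟨p, hp, ?_⟩
  rw [List.getD_eq_getElem l 0 hp, List.getD_eq_getElem l 0 (by omega)]
  omega

-- main loop analysis: A's loop always ends at the sorted permutation with cost 0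
theorem sg_eq : ∀ (n : Nat) (cs : List Int), invCount cs = n →
    state_generation cs = (PySem.List.sorted cs (fun x => x), 0) := by
  intro n
  induction n using Nat.strong_induction_on with
  | _ n IH =>
    intro cs hn
    have hsorted_case : cs.Pairwise (· ≤ ·) →
        (cs, calc_cost cs) = (PySem.List.sorted cs (fun x => x), 0) := by
      intro hpw
      have h0 : calc_cost cs = 0 := by
        rw [calc_cost_eq_invCount, invCount_eq_zero_of_pairwise cs hpw]; rfl
      have hs : PySem.List.sorted cs (fun x => x) = cs :=
        PySem.List.eq_of_perm_of_pairwise_le_of_injective (fun x => x)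
          (fun a b h => h) (PySem.List.sorted_perm cs (fun x => x) false)
          (PySem.List.sorted_pairwise cs (fun x => x)) hpw
      rw [h0, hs]
    -- an adjacent inversion gives a strictly improving candidate
    have himprove : ¬ cs.Pairwise (· ≤ ·) →
        ∃ st ∈ cands cs, calc_cost st < calc_cost cs := by
      intro hnpw
      obtain ⟨p, hp, hlt⟩ := pv_adj_inv cs hnpw
      set a := cs.getD p 0 with ha
      set b := cs.getD (p + 1) 0 with hb
      have hsplit : cs = cs.take p ++ a :: b :: cs.drop (p + 2) := by
        conv_lhs => rw [← List.take_append_drop p cs]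
        rw [List.drop_eq_getElem_cons (by omega : p < cs.length),
          List.drop_eq_getElem_cons (by omega : p + 1 < cs.length)]
        rw [ha, hb, List.getD_eq_getElem cs 0 (by omega), List.getD_eq_getElem cs 0 hp]
      have hlen : (cs.take p).length = p := by
        rw [List.length_take]; omega
      obtain ⟨t, d, hlen, hsplit⟩ : ∃ t d, List.length t = p ∧ cs = t ++ a :: b :: d :=
        ⟨_, _, hlen, hsplit⟩
      have hplen : (p : Int) + 1 < (cs.length : Int) := by exact_mod_cast hp
      have hmem : swap_state cs ((t.length : Int)) ((t.length : Int) + 1) ∈ cands cs := by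
        rw [mem_cands]
        exact ⟨_, _, by positivity, by omega, by rw [hlen]; omega, rfl⟩
      refine ⟨_, hmem, ?_⟩
      have hswap : swap_state cs ((t.length : Int)) ((t.length : Int) + 1)
          = t ++ b :: a :: d := by
        conv_lhs => rw [hsplit]
        exact swap_state_adj t d a b
      rw [hswap, calc_cost_eq_invCount, calc_cost_eq_invCount]
      have h2 := invCount_adj_swap t d a b hlt
      rw [← hsplit] at h2
      omega
    rw [state_generation]
    split
    · next mc ms hbs =>
      split_ifs with hlt
      · -- recursive step
        have hmem : ms ∈ cands cs := by
          have hm := pick_mem (cands cs) none mc ms (by rw [← best_swap_eq_pick]; exact hbs)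
          rcases hm with h' | ⟨hmem, _⟩
          · cases h'
          · exact hmem
        obtain ⟨i, j, h0, hij, hj, hms⟩ := (mem_cands cs ms).mp hmem
        subst hms
        have hperm := swap_state_perm cs i j h0 hij hj
        have hcost : mc = calc_cost (swap_state cs i j) := best_swap_cost cs mc _ hbs
        have hdec : invCount (swap_state cs i j) < n := by
          have h1 : calc_cost (swap_state cs i j) < calc_cost cs := by omega
          rw [calc_cost_eq_invCount, calc_cost_eq_invCount] at h1
          omega
        rw [IH _ hdec _ rfl]
        have : PySem.List.sorted (swap_state cs i j) (fun x => x) = PySem.List.sorted cs (fun x => x) :=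
          (PySem.List.sorted_id_eq_sorted_id_iff_perm _ _).mpr hperm
        rw [this]
      · -- no strict improvement: cs is sorted
        apply hsorted_case
        by_contra hnpw
        obtain ⟨st, hmem, hst⟩ := himprove hnpw
        have hle := (pick_le (cands cs) none mc ms (by rw [← best_swap_eq_pick]; exact hbs)).2 st hmem
        omega
    · next hbs =>
      -- no candidate at all: the list has length ≤ 1, hence is sorted
      apply hsorted_case
      by_contra hnpw
      obtain ⟨st, hmem, _⟩ := himprove hnpw
      have : ((cands cs).foldl pstep none).isSome := by
        obtain ⟨l1, l2, heq⟩ := List.append_of_mem hmem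
        rw [heq, List.foldl_append, List.foldl_cons]
        apply pick_isSome
        cases h' : pstep (l1.foldl pstep none) st with
        | none =>
          cases hacc : (l1.foldl pstep none) with
          | none => rw [hacc] at h'; simp only [pstep] at h'; cases h'
          | some p => obtain ⟨c, s⟩ := p; rw [hacc] at h'; simp only [pstep] at h'; split_ifs at h'
        | some p => rfl
      rw [← best_swap_eq_pick, hbs] at this
      cases this

-- ===== VERDICT (by name: the statement is the Claim_ definition above) =====
theorem state_generation_spec : Claim_equal_state_generation := by
  intro cs _
  show state_generation cs = state_generation_alt cs
  rw [sg_eq (invCount cs) cs rfl]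
  rfl
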